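-- pv_equiv track=rewrite | github.com/mukibi/joe_project2 | eyetv_parser2.py | is_movie_file
-- ===== SOURCE A (Python) =====
-- video_file_extensions = {
-- ".3g2":"3GPP2",
-- ".3gp":"3GPP",
-- ".amv":"AMV video format",
-- ".asf":"Advanced Systems Format (ASF)",
-- ".avi":"AVI",
-- ".drc":"Dirac",
--
-- ".f4v":"Flash Video (FLV)",
-- ".flv":"Flash Video (FLV)",
-- ".f4p":"Flash Video (FLV)",
-- ".f4a":"F4V",
-- ".f4b":"F4V",
--
-- ".gif":"GIF",
-- ".gifv":"Video alternative to GIF",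
-- ".m4v":"M4V - (file format for videos for iPods and PlayStation Portables developed by Apple)",
-- ".mkv":"Matroska",
-- ".mng":"Multiple-image Network Graphics",
--
-- ".mov":"QuickTime File Format",
-- ".qt":"QuickTime File Format",
--
-- ".mp4":"MPEG-4 Part 14 (MP4)",
-- ".m4p":"MPEG-4 Part 14 (MP4)",
-- ".m4v":"MPEG-4 Part 14 (MP4)",
--
-- #".mpg":"MPEG-1",
-- ".mp2":"MPEG-1",
-- ".mpeg":"MPEG-1",
-- ".mpe":"MPEG-1",
-- ".mpv":"MPEG-1",
--
-- ".mxf":"Material Exchange Format (MXF)",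
-- ".nsv":"Nullsoft Streaming Video (NSV)",
--
-- ".ogv":"Ogg Video",
-- ".ogg":"Ogg Video",
--
-- ".rm":"RealMedia (RM)",
-- ".rmvb":"RealMedia Variable Bitrate (RMVB)",
-- ".roq":"ROQ",
-- ".svi":"SVI",
--
-- ".vob":"Vob",
-- ".webm":"WebM",
-- ".wmv":"Windows Media Video",
-- ".yuv":"Raw video format"
--
-- }
--
-- def is_movie_file(file_n):
--
-- 	movie_ext = None
--
-- 	for file_extension in video_file_extensions:
--
-- 		ext_len = len(file_extension)
-- 		file_n_tail = file_n[-ext_len:]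
--
-- 		if (file_extension == file_n_tail.lower()):
-- 			movie_ext = file_n_tail
-- 			break
--
-- 	return movie_ext
-- ===== SOURCE B (Python) =====
-- _VIDEO_EXTS = frozenset(
--     ".3g2 .3gp .amv .asf .avi .drc .f4v .flv .f4p .f4a .f4b .gif .gifv"
--     " .m4v .mkv .mng .mov .qt .mp4 .m4p .mp2 .mpeg .mpe .mpv .mxf .nsv"
--     " .ogv .ogg .rm .rmvb .roq .svi .vob .webm .wmv .yuv".split())
--
-- def is_movie_file(file_n):
--     tail_rev = []
--     for ch in reversed(file_n):
--         tail_rev.append(ch)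
--         if ch == '.':
--             tail = ''.join(reversed(tail_rev))
--             return tail if tail.lower() in _VIDEO_EXTS else None
--     return None
-- ===== Notes on version B (the rewrite author's own statement) =====
-- stated objective: simpler
-- what changed: Instead of A's scan over all 36 extensions (slicing and lowercasing a tail per extension), B scans the filename once backwards to its last dot, accumulating the tail, and does a single set-membership test on the lowercased tail.
import Mathlib
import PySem

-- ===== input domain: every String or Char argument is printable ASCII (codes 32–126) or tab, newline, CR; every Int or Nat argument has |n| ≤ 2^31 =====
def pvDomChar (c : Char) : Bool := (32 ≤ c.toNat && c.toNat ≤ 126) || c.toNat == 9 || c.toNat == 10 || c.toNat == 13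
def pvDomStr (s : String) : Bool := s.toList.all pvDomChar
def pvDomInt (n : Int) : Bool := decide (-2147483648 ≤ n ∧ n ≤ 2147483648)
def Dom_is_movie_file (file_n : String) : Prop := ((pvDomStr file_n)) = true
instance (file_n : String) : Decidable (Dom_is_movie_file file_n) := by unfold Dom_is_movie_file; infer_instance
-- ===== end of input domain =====

-- B replaces A's scan over all 36 extensions by one backward scan of the filename for its last dot plus a single set lookup (objective: simpler).

-- ===== PORT A =====
-- keys of video_file_extensions, in dict insertion order (the duplicate ".m4v" key kept once, at its first position)
def pvExtsA : List String := [".3g2", ".3gp", ".amv", ".asf", ".avi", ".drc", ".f4v", ".flv", ".f4p", ".f4a", ".f4b", ".gif", ".gifv", ".m4v", ".mkv", ".mng", ".mov", ".qt", ".mp4", ".m4p", ".mp2", ".mpeg", ".mpe", ".mpv", ".mxf", ".nsv", ".ogv", ".ogg", ".rm", ".rmvb", ".roq", ".svi", ".vob", ".webm", ".wmv", ".yuv"]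

-- the for-loop with its break: first extension equal to the lowercased tail slice wins
def pvLoopA (file_n : String) : List String → Option String
  | [] => none
  | e :: rest =>
      let file_n_tail := PySem.Str.slice file_n (some (-(PySem.Str.len e))) none
      if e == PySem.Str.lower file_n_tail then some file_n_tail else pvLoopA file_n rest

def is_movie_file (file_n : String) : Option String := pvLoopA file_n pvExtsA

-- ===== PORT B =====
-- _VIDEO_EXTS = frozenset("...".split())
def pvVideoExtsB : PySem.Set String :=
  PySem.Set.ofList (PySem.Str.split₀ (".3g2 .3gp .amv .asf .avi .drc .f4v .flv .f4p .f4a .f4b .gif .gifv .m4v .mkv .mng .mov .qt .mp4 .m4p .mp2 .mpeg .mpe .mpv .mxf .nsv .ogv .ogg .rm .rmvb .roq .svi .vob .webm .wmv .yuv"))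

-- the for-loop over reversed(file_n) with accumulator tail_rev; returns inside the loop at the first dot
def pvScanB : List Char → List Char → Option String
  | _, [] => none
  | tail_rev, ch :: rest =>
      let tail_rev' := tail_rev ++ [ch]
      if ch == '.' then
        let tail := String.ofList tail_rev'.reverse
        if PySem.Str.lower tail ∈ pvVideoExtsB then some tail else none
      else pvScanB tail_rev' rest

def is_movie_file_alt (file_n : String) : Option String := pvScanB [] file_n.toList.reverse

-- ===== PRECONDITION & SPEC =====
def Spec_is_movie_file (file_n : String) (out : Option String) : Prop := out = is_movie_file_alt file_n
instance (file_n : String) (out : Option String) : Decidable (Spec_is_movie_file file_n out) := by unfold Spec_is_movie_file; infer_instance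

-- ===== CLAIM (what is proved, stated in full; the proofs are below) =====
def Claim_equal_is_movie_file : Prop := ∀ (file_n : String), Dom_is_movie_file file_n → Spec_is_movie_file file_n (is_movie_file file_n)

-- ===== LEMMAS AND PROOFS =====

-- every extension starts with '.' and has no further '.'
set_option maxRecDepth 8192 in
theorem pvExts_facts : pvExtsA.all (fun e => (e.toList.head? == some '.') && (e.toList.tail.all (fun d => !(d == '.')))) = true := by decide

theorem pvExts_head {e : String} (he : e ∈ pvExtsA) : e.toList.head? = some '.' := by
  have h := List.all_eq_true.mp pvExts_facts e he
  simp only [Bool.and_eq_true, beq_iff_eq] at h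
  exact h.1

theorem pvExts_tail {e : String} (he : e ∈ pvExtsA) : ∀ d ∈ e.toList.tail, d ≠ '.' := by
  have h := List.all_eq_true.mp pvExts_facts e he
  simp only [Bool.and_eq_true, List.all_eq_true, Bool.not_eq_true', beq_eq_false_iff_ne] at h
  exact h.2

theorem lowerChar_eq_dot {c : Char} (h : PySem.Chars.lowerChar c = '.') : c = '.' := by
  unfold PySem.Chars.lowerChar at h
  split at h
  · rename_i hu
    unfold PySem.Chars.isupper at hu
    simp only [Bool.and_eq_true, decide_eq_true_eq, Char.le_def] at hu
    exfalso
    have h2 := congrArg Char.toNat h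
    rw [Char.toNat_ofNat] at h2
    have hA := UInt32.le_iff_toNat_le.mp hu.1
    have hZ := UInt32.le_iff_toNat_le.mp hu.2
    have e1 : ('A').val.toNat = 65 := rfl
    have e2 : ('Z').val.toNat = 90 := rfl
    have e3 : c.toNat = c.val.toNat := rfl
    have h46 : ('.').toNat = 46 := rfl
    rw [h46] at h2; rw [e1] at hA; rw [e2] at hZ; rw [e3] at h2
    split at h2 <;> omega
  · exact h

-- loop lemmas for A
theorem pvLoopA_none (f : String) (E : List String)
    (h : ∀ e ∈ E, (e == PySem.Str.lower (PySem.Str.slice f (some (-(PySem.Str.len e))) none)) = false) :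
    pvLoopA f E = none := by
  induction E with
  | nil => rfl
  | cons e rest ih =>
      simp only [pvLoopA]
      rw [h e (List.mem_cons_self)]
      simp only [Bool.false_eq_true, if_false]
      exact ih (fun e' he' => h e' (List.mem_cons_of_mem _ he'))

theorem pvLoopA_some (f : String) (E : List String) (t : String)
    (hU : ∀ e ∈ E, (e == PySem.Str.lower (PySem.Str.slice f (some (-(PySem.Str.len e))) none)) = true →
            PySem.Str.slice f (some (-(PySem.Str.len e))) none = t)
    (hex : ∃ e ∈ E, (e == PySem.Str.lower (PySem.Str.slice f (some (-(PySem.Str.len e))) none)) = true) :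
    pvLoopA f E = some t := by
  induction E with
  | nil => rcases hex with ⟨e, he, _⟩; exact absurd he (List.not_mem_nil)
  | cons e rest ih =>
      simp only [pvLoopA]
      by_cases hc : (e == PySem.Str.lower (PySem.Str.slice f (some (-(PySem.Str.len e))) none)) = true
      · rw [hc]; simp only [if_true]
        exact congrArg some (hU e (List.mem_cons_self) hc)
      · rw [Bool.eq_false_iff.mpr hc]
        simp only [Bool.false_eq_true, if_false]
        apply ih
        · exact fun e' he' h' => hU e' (List.mem_cons_of_mem _ he') h'
        · rcases hex with ⟨e', he', h'⟩
          rcases List.mem_cons.mp he' with rfl | he''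
          · exact absurd h' hc
          · exact ⟨e', he'', h'⟩

-- a matching extension starts exactly at the last dot of the filename
theorem match_core (f e : String) (he : e ∈ pvExtsA)
    (hm : (e == PySem.Str.lower (PySem.Str.slice f (some (-(PySem.Str.len e))) none)) = true) :
    ∃ m : Nat, f.toList[m]? = some '.' ∧
      (PySem.Str.slice f (some (-(PySem.Str.len e))) none).toList = f.toList.drop m ∧
      e.toList = PySem.Chars.lower (f.toList.drop m) ∧
      ∀ j, m < j → f.toList[j]? ≠ some '.' := by
  have heq : e = PySem.Str.lower (PySem.Str.slice f (some (-(PySem.Str.len e))) none) := eq_of_beq hm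
  have hhead := pvExts_head he
  have hpos : 0 < e.toList.length := by
    cases h : e.toList with
    | nil => rw [h] at hhead; simp at hhead
    | cons a l => simp
  have hslice : (PySem.Str.slice f (some (-(PySem.Str.len e))) none).toList
      = f.toList.drop (f.toList.length - e.toList.length) := by
    rw [PySem.Str.toList_slice, PySem.Chars.slice_eq_listSlice]
    show PySem.List.slice f.toList (some (-((e.toList.length : Nat) : Int))) none = _
    rw [PySem.List.slice_from_neg_natCast f.toList e.toList.length hpos]
  have hlist : e.toList = PySem.Chars.lower (f.toList.drop (f.toList.length - e.toList.length)) := by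
    conv_lhs => rw [heq]
    rw [PySem.Str.toList_lower, hslice]
  have hlen := congrArg List.length hlist
  simp only [PySem.Chars.lower, List.length_map, List.length_drop] at hlen
  have hnle : e.toList.length ≤ f.toList.length := by omega
  have hdotm : f.toList[f.toList.length - e.toList.length]? = some '.' := by
    have hh := congrArg List.head? hlist
    rw [hhead] at hh
    simp only [PySem.Chars.lower, List.head?_map, List.head?_drop] at hh
    cases hget : f.toList[f.toList.length - e.toList.length]? with
    | none => rw [hget] at hh; simp at hh
    | some c =>
        rw [hget] at hh
        simp only [Option.map_some, Option.some_inj] at hh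
        exact congrArg some (lowerChar_eq_dot hh.symm)
  refine ⟨f.toList.length - e.toList.length, hdotm, hslice, hlist, ?_⟩
  intro j hj hcon
  have hjL : j < f.toList.length := by
    rcases List.getElem?_eq_some_iff.mp hcon with ⟨h, _⟩; exact h
  have hidx : e.toList[j - (f.toList.length - e.toList.length)]? = some '.' := by
    have hidx0 := congrArg (fun xs => xs[j - (f.toList.length - e.toList.length)]?) hlist
    simp only [PySem.Chars.lower, List.getElem?_map, List.getElem?_drop] at hidx0
    have harith : f.toList.length - e.toList.length + (j - (f.toList.length - e.toList.length)) = j := by omega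
    rw [harith, hcon] at hidx0
    simpa using hidx0
  have h1 : 1 ≤ j - (f.toList.length - e.toList.length) := by omega
  have htail : e.toList.tail[j - (f.toList.length - e.toList.length) - 1]? = some '.' := by
    rw [List.getElem?_tail]
    have harith : j - (f.toList.length - e.toList.length) - 1 + 1
        = j - (f.toList.length - e.toList.length) := by omega
    rw [harith]; exact hidx
  exact pvExts_tail he '.' (List.mem_of_getElem? htail) rfl

-- two "dot with no dot after it" positions coincide
theorem last_dot_unique {l : List Char} {m i : Nat} (hdm : l[m]? = some '.')
    (ham : ∀ j, m < j → l[j]? ≠ some '.') (hdi : l[i]? = some '.')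
    (hmax : ∀ j, i < j → l[j]? ≠ some '.') : m = i := by
  rcases Nat.lt_trichotomy m i with h | h | h
  · exact absurd hdi (ham i h)
  · exact h
  · exact absurd hdm (hmax m h)

set_option maxRecDepth 8192 in
theorem pvExtsB_eq : pvVideoExtsB = pvExtsA := by decide

theorem mem_pvVideoExtsB {x : String} : x ∈ pvVideoExtsB ↔ x ∈ pvExtsA := by
  rw [pvExtsB_eq]

-- B's loop never returns when the remaining (reversed) characters contain no dot
theorem pvScanB_no_dot (acc l : List Char) (h : '.' ∉ l) : pvScanB acc l = none := by
  induction l generalizing acc with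
  | nil => rfl
  | cons c rest ih =>
      simp only [pvScanB]
      have hc : (c == '.') = false := by
        simp only [beq_eq_false_iff_ne]
        intro hc; exact h (hc ▸ List.mem_cons_self)
      rw [hc]
      simp only [Bool.false_eq_true, if_false]
      exact ih _ (fun hm => h (List.mem_cons_of_mem _ hm))

-- B's loop stops at the first dot of the reversed list
theorem pvScanB_dot (acc u v : List Char) (h : '.' ∉ u) :
    pvScanB acc (u ++ '.' :: v) =
      (if PySem.Str.lower (String.ofList ((acc ++ u) ++ ['.']).reverse) ∈ pvVideoExtsB
        then some (String.ofList ((acc ++ u) ++ ['.']).reverse) else none) := by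
  induction u generalizing acc with
  | nil =>
      simp only [List.nil_append, List.append_nil, pvScanB]
      simp only [beq_self_eq_true, if_true]
  | cons c rest ih =>
      simp only [List.cons_append, pvScanB]
      have hc : (c == '.') = false := by
        simp only [beq_eq_false_iff_ne]
        intro hc; exact h (hc ▸ List.mem_cons_self)
      rw [hc]
      simp only [Bool.false_eq_true, if_false]
      rw [ih (acc ++ [c]) (fun hm => h (List.mem_cons_of_mem _ hm))]
      simp only [List.append_assoc, List.singleton_append]

-- first-occurrence decomposition
theorem first_occ {a : Char} {l : List Char} (h : a ∈ l) :
    ∃ u v, l = u ++ a :: v ∧ a ∉ u := by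
  induction l with
  | nil => exact absurd h (List.not_mem_nil)
  | cons c rest ih =>
      by_cases hc : a = c
      · exact ⟨[], rest, by rw [hc]; rfl, List.not_mem_nil⟩
      · rcases ih (List.mem_cons.mp h |>.resolve_left hc) with ⟨u, v, heq, hnu⟩
        exact ⟨c :: u, v, by rw [heq]; rfl,
          fun hm => (List.mem_cons.mp hm).elim hc hnu⟩

set_option maxHeartbeats 1000000 in
theorem is_movie_file_eq (f : String) : is_movie_file f = is_movie_file_alt f := by
  by_cases hdot : '.' ∈ f.toList
  case neg =>
    -- no dot anywhere: both sides are none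
    have hB : is_movie_file_alt f = none := by
      apply pvScanB_no_dot
      intro h; exact hdot (List.mem_reverse.mp h)
    rw [hB]
    apply pvLoopA_none
    intro e he
    cases hb : (e == PySem.Str.lower (PySem.Str.slice f (some (-(PySem.Str.len e))) none)) with
    | false => rfl
    | true =>
        exfalso
        obtain ⟨m, hdotm, _, _, _⟩ := match_core f e he hb
        exact hdot (List.mem_of_getElem? hdotm)
  case pos =>
    rcases first_occ (List.mem_reverse.mpr hdot) with ⟨u, v, heq, hnu⟩
    -- original list decomposes around its LAST dot, at index i = v.length
    have hfl : f.toList = v.reverse ++ '.' :: u.reverse := by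
      have := congrArg List.reverse heq
      simpa using this
    set i : Nat := v.length with hi
    have hvl : (v.reverse : List Char).length = i := by rw [hi]; simp
    have hdi : f.toList[i]? = some '.' := by
      rw [hfl, List.getElem?_append_right (by omega)]
      simp [hvl]
    have hmax : ∀ j, i < j → f.toList[j]? ≠ some '.' := by
      intro j hj hc
      rw [hfl, List.getElem?_append_right (by omega), hvl] at hc
      have h1 : 1 ≤ j - i := by omega
      rw [show j - i = (j - i - 1) + 1 by omega] at hc
      simp only [List.getElem?_cons_succ] at hc
      exact hnu (List.mem_reverse.mp (List.mem_of_getElem? hc))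
    have hdropi : f.toList.drop i = '.' :: u.reverse := by
      rw [hfl, ← hvl, List.drop_left]
    -- B's value
    have htail : ((([] : List Char) ++ u) ++ ['.']).reverse = f.toList.drop i := by
      simp [hdropi]
    have hB : is_movie_file_alt f =
        (if PySem.Str.lower (String.ofList (f.toList.drop i)) ∈ pvVideoExtsB
          then some (String.ofList (f.toList.drop i)) else none) := by
      show pvScanB [] f.toList.reverse = _
      rw [heq, pvScanB_dot [] u v hnu, htail]
    set t : String := String.ofList (f.toList.drop i) with ht
    have htl : t.toList = f.toList.drop i := by simp [ht]
    rw [hB]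
    by_cases hmem : PySem.Str.lower t ∈ pvVideoExtsB
    · rw [if_pos hmem]
      apply pvLoopA_some
      · intro e he hc
        obtain ⟨m, hdotm, hsl, hlist, hafter⟩ := match_core f e he hc
        have hmi : m = i := last_dot_unique hdotm hafter hdi hmax
        apply String.toList_inj.mp
        rw [hsl, hmi, htl]
      · refine ⟨PySem.Str.lower t, mem_pvVideoExtsB.mp hmem, ?_⟩
        have hel : (PySem.Str.lower t).toList = PySem.Chars.lower (f.toList.drop i) := by
          rw [PySem.Str.toList_lower, htl]
        have hiL : i < f.toList.length := by
          rcases List.getElem?_eq_some_iff.mp hdi with ⟨h, _⟩; exact h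
        have hlen : (PySem.Str.lower t).toList.length = f.toList.length - i := by
          rw [hel]; simp [PySem.Chars.lower]
        have hpos : 0 < (PySem.Str.lower t).toList.length := by omega
        have hslice2 : (PySem.Str.slice f (some (-(PySem.Str.len (PySem.Str.lower t)))) none).toList
            = f.toList.drop i := by
          rw [PySem.Str.toList_slice, PySem.Chars.slice_eq_listSlice]
          have hlenshow : PySem.Str.len (PySem.Str.lower t)
              = (((PySem.Str.lower t).toList.length : Nat) : Int) := rfl
          rw [hlenshow, PySem.List.slice_from_neg_natCast f.toList _ hpos, hlen]
          have harith : f.toList.length - (f.toList.length - i) = i := by omega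
          rw [harith]
        have heqt : PySem.Str.slice f (some (-(PySem.Str.len (PySem.Str.lower t)))) none = t := by
          apply String.toList_inj.mp
          rw [hslice2, htl]
        rw [heqt]
        exact beq_self_eq_true _
    · rw [if_neg hmem]
      apply pvLoopA_none
      intro e he
      cases hb : (e == PySem.Str.lower (PySem.Str.slice f (some (-(PySem.Str.len e))) none)) with
      | false => rfl
      | true =>
          exfalso
          obtain ⟨m, hdotm, hsl, hlist, hafter⟩ := match_core f e he hb
          have hmi : m = i := last_dot_unique hdotm hafter hdi hmax
          apply hmem
          have heqe : e = PySem.Str.lower t := by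
            apply String.toList_inj.mp
            rw [hlist, hmi, PySem.Str.toList_lower, htl]
          rw [← heqe]
          exact mem_pvVideoExtsB.mpr he

-- ===== VERDICT (by name: the statement is the Claim_ definition above) =====
theorem is_movie_file_spec : Claim_equal_is_movie_file := by
  intro f _
  unfold Spec_is_movie_file
  exact is_movie_file_eq f
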